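-- pv_equiv track=rewrite | github.com/jadams-24/big-cat-roofing-website | analyze_title_content.py | check_words_in_content
-- ===== SOURCE A (Python) =====
-- def check_words_in_content(title_words, content):
--     """Check which title words are missing from content"""
--     missing_words = []
--     found_words = []
--
--     for word in title_words:
--         # Check for the word and common variations
--         variations = [
--             word,
--             word + 's',  # plural
--             word + 'es', # plural
--             word + 'ing', # gerund
--             word + 'ed',  # past tense
--         ]
--
--         found = False
--         for variation in variations:
--             if variation in content:
--                 found = True
--                 break
--
--         if found:
--             found_words.append(word)
--         else:
--             missing_words.append(word)
--
--     return found_words, missing_words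
-- ===== SOURCE B (Python) =====
-- def check_words_in_content(title_words, content):
--     """Check which title words are missing from content"""
--     found_words = [w for w in title_words if w in content]
--     missing_words = [w for w in title_words if w not in content]
--     return found_words, missing_words
-- ===== Notes on version B (the rewrite author's own statement) =====
-- stated objective: simpler
-- what changed: Drops the suffix-variations list and the inner break loop (each variation contains the bare word as a substring, so the loop reduces to a single `word in content` test) and replaces the accumulator loop with two comprehensions partitioning title_words.
import Mathlib
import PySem

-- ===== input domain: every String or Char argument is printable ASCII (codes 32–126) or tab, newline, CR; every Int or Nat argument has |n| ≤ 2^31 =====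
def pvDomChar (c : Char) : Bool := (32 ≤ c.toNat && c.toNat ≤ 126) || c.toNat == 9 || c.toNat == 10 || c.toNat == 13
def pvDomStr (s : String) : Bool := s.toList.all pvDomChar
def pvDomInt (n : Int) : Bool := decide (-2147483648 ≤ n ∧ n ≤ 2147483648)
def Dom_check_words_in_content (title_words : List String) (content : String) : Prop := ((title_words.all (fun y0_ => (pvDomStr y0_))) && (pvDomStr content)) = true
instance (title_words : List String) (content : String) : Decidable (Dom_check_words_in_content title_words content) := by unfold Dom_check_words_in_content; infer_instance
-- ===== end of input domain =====

-- B drops A's suffix-variations list and inner break loop (every variation contains the bare word,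
-- so the loop is equivalent to one `word in content` test) and partitions with two comprehensions. Objective: simpler.

-- ===== PORT A =====
def check_words_in_content (title_words : List String) (content : String) : List String × List String :=
  -- for word in title_words: build variations, inner for-with-break = List.any, append to found/missing
  let (found_words, missing_words) :=
    title_words.foldl (fun (st : List String × List String) word =>
      let variations := [word, word ++ "s", word ++ "es", word ++ "ing", word ++ "ed"]
      let found := variations.any (fun v => PySem.Str.isIn v content)
      if found then (st.1 ++ [word], st.2) else (st.1, st.2 ++ [word])) ([], [])
  (found_words, missing_words)

-- ===== PORT B =====
def check_words_in_content_alt (title_words : List String) (content : String) : List String × List String :=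
  (title_words.filter (fun w => PySem.Str.isIn w content),
   title_words.filter (fun w => !PySem.Str.isIn w content))

-- ===== PRECONDITION & SPEC =====
def Spec_check_words_in_content (title_words : List String) (content : String) (out : List String × List String) : Prop := out = check_words_in_content_alt title_words content
instance (title_words : List String) (content : String) (out : List String × List String) : Decidable (Spec_check_words_in_content title_words content out) := by unfold Spec_check_words_in_content; infer_instance

-- ===== CLAIM (what is proved, stated in full; the proofs are below) =====
def Claim_equal_check_words_in_content : Prop := ∀ (title_words : List String) (content : String), Dom_check_words_in_content title_words content → Spec_check_words_in_content title_words content (check_words_in_content title_words content)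

-- ===== LEMMAS AND PROOFS =====

-- a suffix variation being a substring of content implies the bare word is one
theorem isIn_append_imp (w suf content : String)
    (h : PySem.Str.isIn (w ++ suf) content = true) : PySem.Str.isIn w content = true := by
  rw [PySem.Str.isIn_iff_infix] at h ⊢
  have hpre : w.toList <+: (w ++ suf).toList := by
    simp [String.toList_append]
  exact hpre.isInfix.trans h

-- the variations test collapses to the bare substring test
theorem variations_any (w content : String) :
    ([w, w ++ "s", w ++ "es", w ++ "ing", w ++ "ed"].any (fun v => PySem.Str.isIn v content))
      = PySem.Str.isIn w content := by
  cases hw : PySem.Str.isIn w content with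
  | true => simp only [List.any_cons, List.any_nil, hw, Bool.true_or]
  | false =>
    simp only [List.any_cons, List.any_nil, hw, Bool.false_or, Bool.or_false]
    have h1 : PySem.Str.isIn (w ++ "s") content = false := by
      cases h : PySem.Str.isIn (w ++ "s") content
      · rfl
      · rw [isIn_append_imp w "s" content h] at hw; exact hw
    have h2 : PySem.Str.isIn (w ++ "es") content = false := by
      cases h : PySem.Str.isIn (w ++ "es") content
      · rfl
      · rw [isIn_append_imp w "es" content h] at hw; exact hw
    have h3 : PySem.Str.isIn (w ++ "ing") content = false := by
      cases h : PySem.Str.isIn (w ++ "ing") content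
      · rfl
      · rw [isIn_append_imp w "ing" content h] at hw; exact hw
    have h4 : PySem.Str.isIn (w ++ "ed") content = false := by
      cases h : PySem.Str.isIn (w ++ "ed") content
      · rfl
      · rw [isIn_append_imp w "ed" content h] at hw; exact hw
    simp only [h1, h2, h3, h4, Bool.or_self]

-- loop invariant: A's fold appends the filtered rest to the accumulators
theorem foldA_eq (content : String) (title_words : List String) (fw mw : List String) :
    title_words.foldl (fun (st : List String × List String) word =>
      let variations := [word, word ++ "s", word ++ "es", word ++ "ing", word ++ "ed"]
      let found := variations.any (fun v => PySem.Str.isIn v content)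
      if found then (st.1 ++ [word], st.2) else (st.1, st.2 ++ [word])) (fw, mw)
    = (fw ++ title_words.filter (fun w => PySem.Str.isIn w content),
       mw ++ title_words.filter (fun w => !PySem.Str.isIn w content)) := by
  induction title_words generalizing fw mw with
  | nil => simp
  | cons w t ih =>
    simp only [variations_any] at ih
    simp only [List.foldl_cons, variations_any, List.filter_cons]
    cases h : PySem.Str.isIn w content with
    | true =>
      rw [if_pos rfl, if_pos rfl, if_neg (by simp), ih]
      simp
    | false =>
      rw [if_neg (by simp), if_neg (by simp), if_pos (by simp), ih]
      simp

-- ===== VERDICT (by name: the statement is the Claim_ definition above) =====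
theorem check_words_in_content_spec : Claim_equal_check_words_in_content := by
  intro title_words content _
  show _ = _
  unfold check_words_in_content check_words_in_content_alt
  simp only [foldA_eq, List.nil_append]
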